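-- pv_equiv track=rewrite | github.com/PenguinInPyjamas/advent-of-code-2021 | 10/10.py | reduce_line
-- ===== SOURCE A (Python) =====
-- def reduce_line(line):
--     reduced_line = line
--     while len(reduced_line) > 1:
--         for i in range(len(reduced_line) - 1):
--             if reduced_line[i:i+2] in ["()", "[]", "{}", "<>"]:
--                 reduced_line = reduced_line[:i] + reduced_line[i+2:]
--                 break
--         else:
--             break
--     return reduced_line
-- ===== SOURCE B (Python) =====
-- def reduce_line(line):
--     stack = []
--     for c in line:
--         if stack and stack[-1] + c in ("()", "[]", "{}", "<>"):
--             stack.pop()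
--         else:
--             stack.append(c)
--     return ''.join(stack)
-- ===== Notes on version B (the rewrite author's own statement) =====
-- stated objective: simpler
-- what changed: Replaced the restart-and-rescan loop (find the leftmost adjacent matched bracket pair, splice it out, rescan from the start) with a single left-to-right pass keeping a stack that pops when the incoming character closes the bracket on top.
import Mathlib
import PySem

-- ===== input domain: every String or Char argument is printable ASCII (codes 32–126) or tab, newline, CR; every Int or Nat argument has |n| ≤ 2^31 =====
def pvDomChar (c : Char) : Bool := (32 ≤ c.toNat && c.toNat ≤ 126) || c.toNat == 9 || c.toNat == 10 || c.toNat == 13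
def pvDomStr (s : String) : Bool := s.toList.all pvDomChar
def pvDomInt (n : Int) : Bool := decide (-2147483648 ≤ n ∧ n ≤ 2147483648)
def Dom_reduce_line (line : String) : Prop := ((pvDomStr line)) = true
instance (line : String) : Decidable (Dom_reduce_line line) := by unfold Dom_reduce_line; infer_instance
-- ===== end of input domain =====

-- B replaces A's repeated leftmost-pair removal (rescan + splice each round) with one stack pass; return value only, no mutation.

-- ===== PORT A =====

-- the literal list ["()", "[]", "{}", "<>"] of A's membership test, as char lists
def pvPairs : List (List Char) := [['(',')'], ['[',']'], ['{','}'], ['<','>']]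

-- A's inner for-loop: first index i with reduced_line[i:i+2] in ["()","[]","{}","<>"], else none (the loop's 'else: break')
def pvFindA : List Char → Option Nat
  | a :: b :: t => if [a, b] ∈ pvPairs then some 0 else (pvFindA (b :: t)).map (· + 1)
  | _ => none

-- (termination facts for pvReduceA, cited by its decreasing_by)
theorem pvFindA_some {s : List Char} {i : Nat} (h : pvFindA s = some i) :
    ∃ u a b v, s = u ++ a :: b :: v ∧ u.length = i ∧ [a, b] ∈ pvPairs := by
  induction s generalizing i with
  | nil => simp [pvFindA] at h
  | cons a t ih =>
    match t with
    | [] => simp [pvFindA] at h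
    | b :: t' =>
      by_cases hp : [a, b] ∈ pvPairs
      · simp [pvFindA, hp] at h
        exact ⟨[], a, b, t', by simp, by simp [← h], hp⟩
      · simp [pvFindA, hp] at h
        obtain ⟨j, hj, rfl⟩ := h
        obtain ⟨u, a', b', v, heq, hl, hm⟩ := ih hj
        exact ⟨a :: u, a', b', v, by simp [heq], by simp [hl], hm⟩

theorem pvRemove_eq (u v : List Char) (a b : Char) :
    (u ++ a :: b :: v).take u.length ++ (u ++ a :: b :: v).drop (u.length + 2) = u ++ v := by
  rw [List.take_left, List.drop_length_add_append]; rfl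

theorem pvRemove_len {s : List Char} {i : Nat} (h : pvFindA s = some i) :
    (s.take i ++ s.drop (i + 2)).length < s.length := by
  obtain ⟨u, a, b, v, rfl, rfl, _⟩ := pvFindA_some h
  rw [pvRemove_eq]; simp

-- A's while-loop: splice out the found pair (line[:i] + line[i+2:]) and restart; stop on 'else: break' or len ≤ 1
def pvReduceA (s : List Char) : List Char :=
  if s.length > 1 then
    match hf : pvFindA s with
    | some i => pvReduceA (s.take i ++ s.drop (i + 2))
    | none => s
  else s
termination_by s.length
decreasing_by exact pvRemove_len hf

def reduce_line (line : String) : String := String.ofList (pvReduceA line.toList)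

-- ===== PORT B =====

-- one step of B's loop: pop when the incoming char closes the bracket on top, else push
def pvStep (st : List Char) (c : Char) : List Char :=
  match st with
  | top :: rest => if [top, c] ∈ pvPairs then rest else c :: st
  | [] => [c]

def reduce_line_alt (line : String) : String :=
  String.ofList ((line.toList.foldl pvStep []).reverse)

-- ===== PRECONDITION & SPEC =====
def Spec_reduce_line (line : String) (out : String) : Prop := out = reduce_line_alt line
instance (line : String) (out : String) : Decidable (Spec_reduce_line line out) := by unfold Spec_reduce_line; infer_instance

-- ===== CLAIM (what is proved, stated in full; the proofs are below) =====
def Claim_equal_reduce_line : Prop := ∀ (line : String), Dom_reduce_line line → Spec_reduce_line line (reduce_line line)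

-- ===== LEMMAS AND PROOFS =====

-- an opener (first component of a pair) is never the second component of any pair
theorem pv_opener_not_closer {a b x : Char} (h : [a, b] ∈ pvPairs) : [x, a] ∉ pvPairs := by
  intro h2
  simp [pvPairs] at h h2
  rcases h with ⟨rfl, rfl⟩ | ⟨rfl, rfl⟩ | ⟨rfl, rfl⟩ | ⟨rfl, rfl⟩ <;> simp_all

-- B's fold is invariant under removing one adjacent matched pair anywhere
theorem pvStep_invariant {a b : Char} (h : [a, b] ∈ pvPairs) (u v : List Char) (st : List Char) :
    (u ++ a :: b :: v).foldl pvStep st = (u ++ v).foldl pvStep st := by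
  induction u generalizing st with
  | nil =>
    have h1 : pvStep st a = a :: st := by
      match st with
      | [] => rfl
      | top :: rest => simp [pvStep, pv_opener_not_closer h]
    have h2 : pvStep (a :: st) b = st := by simp [pvStep, h]
    rw [List.nil_append, List.foldl_cons, h1, List.foldl_cons, h2, List.nil_append]
  | cons c u ih => simp only [List.cons_append, List.foldl_cons, ih]

-- on a string with no adjacent matched pair (and none against the stack top), B's fold just pushes
theorem pvFold_of_none {s : List Char} (hs : pvFindA s = none) (st : List Char)
    (hb : ∀ c a, st.head? = some c → s.head? = some a → [c, a] ∉ pvPairs) :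
    s.foldl pvStep st = s.reverse ++ st := by
  induction s generalizing st with
  | nil => simp
  | cons a t ih =>
    have h1 : pvStep st a = a :: st := by
      match st with
      | [] => rfl
      | top :: rest =>
        have := hb top a rfl rfl
        simp [pvStep, this]
    match t, hs with
    | [], _ => simp [h1]
    | b :: t', hs =>
      have hab : [a, b] ∉ pvPairs := by
        intro hp; simp [pvFindA, hp] at hs
      have ht : pvFindA (b :: t') = none := by
        simp [pvFindA, hab] at hs; simpa using hs
      have hb' : ∀ c x, (a :: st).head? = some c → (b :: t').head? = some x → [c, x] ∉ pvPairs := by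
        intro c x hc hx
        simp at hc hx; subst hc; subst hx; exact hab
      rw [List.foldl_cons, h1, ih ht (a :: st) hb']
      simp

-- A's result carries no adjacent matched pair
theorem pvReduceA_none (s : List Char) : pvFindA (pvReduceA s) = none := by
  rw [pvReduceA]
  split
  · split
    · exact pvReduceA_none _
    · assumption
  · rename_i hlen
    match s with
    | [] => rfl
    | [a] => rfl
    | a :: b :: t => simp at hlen
termination_by s.length
decreasing_by rename_i hf _; exact pvRemove_len hf

-- B's fold is invariant across A's whole reduction
theorem pvReduceA_fold (s : List Char) : (pvReduceA s).foldl pvStep [] = s.foldl pvStep [] := by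
  rw [pvReduceA]
  split
  · split
    · rename_i i hf
      have hrec := pvReduceA_fold (s.take i ++ s.drop (i + 2))
      obtain ⟨u, a, b, v, heq, hl, hm⟩ := pvFindA_some hf
      subst heq; subst hl
      rw [hrec, pvRemove_eq, pvStep_invariant hm]
    · rfl
  · rfl
termination_by s.length
decreasing_by rename_i hf _; exact pvRemove_len hf

theorem pvMain (s : List Char) : pvReduceA s = (s.foldl pvStep []).reverse := by
  have h1 := pvReduceA_fold s
  have h2 := pvFold_of_none (pvReduceA_none s) [] (by intro c a hc; simp at hc)
  rw [← h1, h2]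
  simp

-- ===== VERDICT (by name: the statement is the Claim_ definition above) =====
theorem reduce_line_spec : Claim_equal_reduce_line := by
  intro line _
  unfold Spec_reduce_line reduce_line reduce_line_alt
  rw [pvMain]
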